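-- pv_equiv track=rewrite | github.com/Azure/hpcpack-acm | src/Diagnostics/MPI-PingPong/MPI-Pingpong-reduce.py | getLargestNonoverlappingGroups
-- ===== SOURCE A (Python) =====
-- def getLargestNonoverlappingGroups(groups):
--     largestGroups = []
--     visitedNodes = set()
--     while len(groups):
--         maxLen = max([len(group) for group in groups])
--         largestGroup = [group for group in groups if len(group) == maxLen][0]
--         largestGroups.append(largestGroup)
--         visitedNodes.update(largestGroup)
--         groupsToRemove = []
--         for group in groups:
--             for node in group:
--                 if node in visitedNodes:
--                     groupsToRemove.append(group)
--                     break
--         groups = [group for group in groups if group not in groupsToRemove]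
--     return largestGroups
-- ===== SOURCE B (Python) =====
-- def getLargestNonoverlappingGroups(groups):
--     largestGroups = []
--     visited = set()
--     for group in sorted(groups, key=len, reverse=True):
--         if visited.isdisjoint(group):
--             largestGroups.append(group)
--             visited.update(group)
--     return largestGroups
-- ===== Notes on version B (the rewrite author's own statement) =====
-- stated objective: faster
-- what changed: A repeatedly rescans the remaining groups to find the max-length group and rebuilds the list each round; B sorts the groups once by descending length (stable) and makes a single greedy pass keeping each group disjoint from the running visited set.
import Mathlib
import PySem

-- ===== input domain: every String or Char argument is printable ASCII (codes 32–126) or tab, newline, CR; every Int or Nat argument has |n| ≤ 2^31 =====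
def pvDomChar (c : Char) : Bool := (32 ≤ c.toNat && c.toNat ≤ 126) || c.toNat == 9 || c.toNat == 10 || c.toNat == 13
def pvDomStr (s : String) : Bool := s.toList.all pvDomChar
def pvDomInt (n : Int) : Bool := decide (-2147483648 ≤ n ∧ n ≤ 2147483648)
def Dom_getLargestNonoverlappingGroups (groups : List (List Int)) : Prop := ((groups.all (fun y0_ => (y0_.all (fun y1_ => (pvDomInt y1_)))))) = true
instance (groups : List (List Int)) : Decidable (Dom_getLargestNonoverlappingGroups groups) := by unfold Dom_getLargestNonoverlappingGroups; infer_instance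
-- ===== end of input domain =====

-- B replaces A's repeated max-scan-and-remove loop by one stable sort by descending
-- length and a single greedy pass over it (objective: faster).

-- ===== PORT A =====
-- The while loop is ported with fuel groups.length + 1: under Pre_ (no empty group)
-- every iteration removes at least the selected group, so the fuel is never exhausted.
-- The inner 'for node in group: if node in visitedNodes: append; break' appends the
-- group iff some of its nodes is visited, ported as an any-test over the same group.
-- The '[0]' index is pyGet? 0 with default []; the default is never used because the
-- filtered list provably contains the max-length group when groups is nonempty.
def pyA_loop : Nat → List (List Int) → List (List Int) → PySem.Set Int → List (List Int)
  | 0, _, largestGroups, _ => largestGroups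
  | fuel+1, groups, largestGroups, visitedNodes =>
    if groups.isEmpty then largestGroups
    else
      let maxLen : Int := (PySem.List.max? (groups.map (fun group => (group.length : Int))) (fun x => x)).getD 0
      let largestGroup : List Int := (PySem.List.pyGet? (groups.filter (fun group => (group.length : Int) == maxLen)) 0).getD []
      let largestGroups' := largestGroups ++ [largestGroup]
      let visitedNodes' := PySem.Set.update visitedNodes largestGroup
      let groupsToRemove := groups.foldl
        (fun r group => if group.any (fun node => PySem.Set.contains visitedNodes' node) then r ++ [group] else r)
        ([] : List (List Int))
      let groups' := groups.filter (fun group => !(groupsToRemove.contains group))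
      pyA_loop fuel groups' largestGroups' visitedNodes'

def getLargestNonoverlappingGroups (groups : List (List Int)) : List (List Int) :=
  pyA_loop (groups.length + 1) groups [] PySem.Set.empty

-- ===== PORT B =====
def pyB_go : List (List Int) → PySem.Set Int → List (List Int)
  | [], _ => []
  | group :: rest, visited =>
    if PySem.Set.isdisjoint visited group then
      group :: pyB_go rest (PySem.Set.update visited group)
    else
      pyB_go rest visited

def getLargestNonoverlappingGroups_alt (groups : List (List Int)) : List (List Int) :=
  pyB_go (PySem.List.sorted groups (fun group => group.length) true) PySem.Set.empty

-- ===== PRECONDITION & SPEC =====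
-- Pre_ excludes inputs containing an empty group: on those A's while loop can never
-- remove the empty groups, so the Python A loops forever and returns nothing.
def Pre_getLargestNonoverlappingGroups (groups : List (List Int)) : Prop := [] ∉ groups
instance (groups : List (List Int)) : Decidable (Pre_getLargestNonoverlappingGroups groups) := by
  unfold Pre_getLargestNonoverlappingGroups; infer_instance

def pvWitness_getLargestNonoverlappingGroups : List (List Int) := [[1, 2], [2, 3], [4]]

def Spec_getLargestNonoverlappingGroups (groups : List (List Int)) (out : List (List Int)) : Prop := out = getLargestNonoverlappingGroups_alt groups
instance (groups : List (List Int)) (out : List (List Int)) : Decidable (Spec_getLargestNonoverlappingGroups groups out) := by unfold Spec_getLargestNonoverlappingGroups; infer_instance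

-- ===== CLAIM (what is proved, stated in full; the proofs are below) =====
def Claim_equal_getLargestNonoverlappingGroups : Prop := ∀ (groups : List (List Int)), Dom_getLargestNonoverlappingGroups groups → Pre_getLargestNonoverlappingGroups groups → Spec_getLargestNonoverlappingGroups groups (getLargestNonoverlappingGroups groups)

-- ===== LEMMAS AND PROOFS =====

-- membership in a visited set after update
lemma mem_update_iff (v : PySem.Set Int) (g : List Int) (n : Int) :
    n ∈ PySem.Set.update v g ↔ n ∈ v ∨ n ∈ g := by
  induction g generalizing v with
  | nil => simp [PySem.Set.update]
  | cons a t ih =>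
    show n ∈ PySem.Set.update (v.add a) t ↔ _
    rw [ih]
    simp [PySem.Set.mem_add]; tauto

lemma isdisjoint_eq (v : PySem.Set Int) (g : List Int) :
    PySem.Set.isdisjoint v g = !(g.any (fun n => PySem.Set.contains v n)) := by
  rw [Bool.eq_iff_iff]
  simp [PySem.Set.isdisjoint, PySem.Set.contains]
  tauto

lemma insertBy_all_before (b : List Int → List Int → Bool) (x : List Int) (l : List (List Int))
    (h : ∀ y ∈ l, b x y = true) :
    PySem.List.insertBy b x l = x :: l := by
  cases l with
  | nil => simp [PySem.List.insertBy]
  | cons y ys => simp [PySem.List.insertBy, h y (List.mem_cons_self ..)]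

-- filtering commutes with one insertion step of the descending-length insertion sort
lemma filter_insertBy (p : List Int → Bool) (x : List Int) (l : List (List Int))
    (hl : l.Pairwise (fun a b => b.length ≤ a.length)) :
    (PySem.List.insertBy (fun a b => decide (b.length < a.length)) x l).filter p =
      if p x then PySem.List.insertBy (fun a b => decide (b.length < a.length)) x (l.filter p)
      else l.filter p := by
  induction l with
  | nil => cases hp : p x <;> simp [PySem.List.insertBy, hp]
  | cons y l ih =>
    rw [List.pairwise_cons] at hl
    obtain ⟨hy, hl'⟩ := hl
    by_cases hlt : y.length < x.length
    · rw [show PySem.List.insertBy (fun a b => decide (b.length < a.length)) x (y :: l) =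
          x :: y :: l by simp [PySem.List.insertBy, hlt]]
      cases hp : p x with
      | false => simp [List.filter, hp]
      | true =>
        rw [insertBy_all_before _ _ _ ?_]
        · simp [List.filter, hp]
        · intro z hz
          rcases List.mem_filter.mp hz with ⟨hz, _⟩
          rcases List.mem_cons.mp hz with rfl | hz
          · simp [hlt]
          · have := hy z hz; simp; omega
    · rw [show PySem.List.insertBy (fun a b => decide (b.length < a.length)) x (y :: l) =
          y :: PySem.List.insertBy (fun a b => decide (b.length < a.length)) x l by
            simp [PySem.List.insertBy, hlt]]
      cases hp : p x with
      | false =>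
        cases hpy : p y <;> simp [List.filter, hp, hpy, ih hl']
      | true =>
        cases hpy : p y
        · simp [List.filter, hpy, ih hl', hp]
        · have hstep : PySem.List.insertBy (fun a b => decide (b.length < a.length)) x
              (y :: l.filter p) =
              y :: PySem.List.insertBy (fun a b => decide (b.length < a.length)) x
                (l.filter p) := by
            simp [PySem.List.insertBy, hlt]
          simp [List.filter, hpy, hp, ih hl', hstep]

lemma sorted_rev_snoc (xs : List (List Int)) (x : List Int) :
    PySem.List.sorted (xs ++ [x]) (fun g => g.length) true =
      PySem.List.insertBy (fun a b => decide (b.length < a.length)) x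
        (PySem.List.sorted xs (fun g => g.length) true) := by
  rw [PySem.List.sorted_rev_eq_foldl_insertBy, PySem.List.sorted_rev_eq_foldl_insertBy,
    List.foldl_append]
  rfl

-- stable sort commutes with filtering
lemma sorted_rev_filter (p : List Int → Bool) (xs : List (List Int)) :
    PySem.List.sorted (xs.filter p) (fun g => g.length) true =
      (PySem.List.sorted xs (fun g => g.length) true).filter p := by
  induction xs using List.reverseRecOn with
  | nil => rfl
  | append_singleton xs x ih =>
    rw [List.filter_append, sorted_rev_snoc,
      filter_insertBy p x _ (PySem.List.sorted_pairwise_rev xs (fun g => g.length))]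
    cases hp : p x with
    | false => simpa [List.filter, hp] using ih
    | true =>
      rw [show List.filter p [x] = [x] by simp [List.filter, hp], sorted_rev_snoc, ih]
      simp

-- stability: the head of the descending sort is the FIRST group of maximal length
lemma find_head_sorted_rev (xs : List (List Int)) (m : List Int) (t : List (List Int))
    (h : PySem.List.sorted xs (fun g => g.length) true = m :: t) :
    xs.find? (fun g => decide (m.length ≤ g.length)) = some m := by
  induction xs using List.reverseRecOn generalizing m t with
  | nil => simp [PySem.List.sorted] at h
  | append_singleton xs x ih =>
    rw [sorted_rev_snoc] at h
    cases hs : PySem.List.sorted xs (fun g => g.length) true with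
    | nil =>
      have hxs : xs = [] := (PySem.List.sorted_eq_nil_iff xs (fun g => g.length) true).mp hs
      subst hxs
      rw [hs] at h
      have h' : [x] = m :: t := by simpa [PySem.List.insertBy] using h
      obtain ⟨h1, h2⟩ := List.cons.inj h'
      subst h1
      simp
    | cons m0 t0 =>
      rw [hs] at h
      have hmax : ∀ y ∈ xs, y.length ≤ m0.length :=
        PySem.List.key_head_sorted_rev_ge xs (fun g => g.length) hs
      by_cases hlt : m0.length < x.length
      · rw [show PySem.List.insertBy (fun a b => decide (b.length < a.length)) x (m0 :: t0) =
            x :: m0 :: t0 by simp [PySem.List.insertBy, hlt]] at h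
        obtain ⟨h1, h2⟩ := List.cons.inj h
        subst h1
        rw [List.find?_append]
        have hnone : xs.find? (fun g => decide (x.length ≤ g.length)) = none := by
          rw [List.find?_eq_none]
          intro y hy
          have := hmax y hy
          simp; omega
        simp [hnone]
      · rw [show PySem.List.insertBy (fun a b => decide (b.length < a.length)) x (m0 :: t0) =
            m0 :: PySem.List.insertBy (fun a b => decide (b.length < a.length)) x t0 by
              simp [PySem.List.insertBy, hlt]] at h
        obtain ⟨h1, h2⟩ := List.cons.inj h
        subst h1
        rw [List.find?_append, ih m0 t0 hs]
        rfl

-- the greedy pass ignores groups that meet the current visited set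
lemma pyB_go_filter : ∀ (n : Nat) (s : List (List Int)) (v : PySem.Set Int), s.length ≤ n →
    pyB_go (s.filter (fun g => !(g.any (fun x => PySem.Set.contains v x)))) v = pyB_go s v := by
  intro n
  induction n with
  | zero =>
    intro s v hs
    rw [Nat.le_zero, List.length_eq_zero_iff] at hs
    subst hs; rfl
  | succ n ih =>
    intro s v hs
    cases s with
    | nil => rfl
    | cons g rest =>
      simp only [List.length_cons, Nat.succ_le_succ_iff] at hs
      cases hd : PySem.Set.isdisjoint v g with
      | false =>
        have hg : (!(g.any (fun x => PySem.Set.contains v x))) = false := by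
          rw [isdisjoint_eq] at hd
          simpa using hd
        rw [List.filter_cons_of_neg (p := fun h => !(h.any (fun x => PySem.Set.contains v x))) (a := g) (l := rest) (by
          intro hc
          have hc' : (!(g.any (fun x => PySem.Set.contains v x))) = true := hc
          rw [hg] at hc'
          exact Bool.false_ne_true hc')]
        rw [ih rest v hs]
        simp [pyB_go, hd]
      | true =>
        have hg : (!(g.any (fun x => PySem.Set.contains v x))) = true := by
          rw [isdisjoint_eq] at hd
          simpa using hd
        rw [List.filter_cons_of_pos (p := fun h => !(h.any (fun x => PySem.Set.contains v x))) (a := g) (l := rest) hg]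
        simp only [pyB_go, hd, if_pos]
        congr 1
        have hsub : ∀ (h : List Int),
            (!(h.any (fun x => PySem.Set.contains (PySem.Set.update v g) x))) = true →
            (!(h.any (fun x => PySem.Set.contains v x))) = true := by
          intro h hh
          simp only [Bool.not_eq_eq_eq_not, Bool.not_true, List.any_eq_false] at hh ⊢
          intro x hx
          have := hh x hx
          simp only [PySem.Set.contains, List.contains_iff_mem] at this ⊢
          rw [mem_update_iff] at this
          tauto
        calc pyB_go (rest.filter (fun g => !(g.any (fun x => PySem.Set.contains v x))))
              (PySem.Set.update v g)
            = pyB_go ((rest.filter (fun g => !(g.any (fun x => PySem.Set.contains v x)))).filter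
                (fun h => !(h.any (fun x => PySem.Set.contains (PySem.Set.update v g) x))))
                (PySem.Set.update v g) := by
              rw [ih _ (PySem.Set.update v g) (le_trans (List.length_filter_le ..) hs)]
          _ = pyB_go (rest.filter
                (fun h => !(h.any (fun x => PySem.Set.contains (PySem.Set.update v g) x))))
                (PySem.Set.update v g) := by
              rw [List.filter_filter]
              congr 1
              apply List.filter_congr
              intro h _
              show ((!(h.any (fun x => PySem.Set.contains (PySem.Set.update v g) x))) &&
                  (!(h.any (fun x => PySem.Set.contains v x)))) =
                (!(h.any (fun x => PySem.Set.contains (PySem.Set.update v g) x)))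
              cases hh : (!(h.any (fun x => PySem.Set.contains (PySem.Set.update v g) x))) with
              | false => simp
              | true => rw [hsub h hh]; rfl
          _ = pyB_go rest (PySem.Set.update v g) := ih _ (PySem.Set.update v g) hs

-- main loop correspondence: A's while loop with visited set v equals the greedy pass
-- over the descending-length sort of the remaining groups, with the same visited set
lemma pyA_loop_eq : ∀ (fuel : Nat) (gs acc : List (List Int)) (v : PySem.Set Int),
    gs.length < fuel → [] ∉ gs →
    (∀ g ∈ gs, g.any (fun n => PySem.Set.contains v n) = false) →
    pyA_loop fuel gs acc v = acc ++ pyB_go (PySem.List.sorted gs (fun g => g.length) true) v := by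
  intro fuel
  induction fuel with
  | zero => intro gs acc v h; omega
  | succ fuel ih =>
    intro gs acc v hlen hne hdisj
    by_cases hnil : gs = []
    · subst hnil
      simp [pyA_loop, pyB_go, PySem.List.sorted]
    · cases hs : PySem.List.sorted gs (fun g => g.length) true with
      | nil => exact absurd ((PySem.List.sorted_eq_nil_iff ..).mp hs) hnil
      | cons m t =>
        have hm_mem : m ∈ gs := by
          have : m ∈ PySem.List.sorted gs (fun g => g.length) true := by
            rw [hs]; exact List.mem_cons_self ..
          exact (List.Perm.mem_iff (PySem.List.sorted_perm ..)).mp this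
        have hmax : ∀ y ∈ gs, y.length ≤ m.length :=
          PySem.List.key_head_sorted_rev_ge gs (fun g => g.length) hs
        -- step 1: the computed maxLen is m.length
        have hmaxLen : (PySem.List.max? (gs.map (fun group => (group.length : Int)))
            (fun x => x)).getD 0 = (m.length : Int) := by
          cases hM : PySem.List.max? (gs.map (fun group => (group.length : Int))) (fun x => x) with
          | none =>
            rw [PySem.List.max?_eq_none_iff, List.map_eq_nil_iff] at hM
            exact absurd hM hnil
          | some M =>
            have hMmem := PySem.List.max?_mem hM
            rcases List.mem_map.mp hMmem with ⟨g0, hg0, rfl⟩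
            have h1 : (m.length : Int) ≤ (g0.length : Int) :=
              PySem.List.max?_isMax hM _ (List.mem_map.mpr ⟨m, hm_mem, rfl⟩)
            have h2 := hmax g0 hg0
            simp only [Option.getD_some]
            omega
        -- step 2: the selected largestGroup is m, the head of the sort
        have hsel : (PySem.List.pyGet? (gs.filter
            (fun group => (group.length : Int) == (m.length : Int))) 0).getD [] = m := by
          have hflt : gs.filter (fun group => (group.length : Int) == (m.length : Int)) =
              gs.filter (fun g => decide (m.length ≤ g.length)) := by
            apply List.filter_congr
            intro g hg
            have := hmax g hg
            rw [Bool.eq_iff_iff]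
            simp; omega
          rw [hflt]
          have hget0 : ∀ (l : List (List Int)), PySem.List.pyGet? l 0 = l.head? := by
            intro l; cases l <;> simp [PySem.List.pyGet?, PySem.List.pyIdx?]
          rw [hget0, List.head?_filter, find_head_sorted_rev gs m t hs]
          rfl
        -- unfold one iteration of the A loop
        simp only [pyA_loop]
        rw [if_neg (by simp [hnil])]
        rw [hmaxLen, hsel]
        rw [PySem.List.foldl_append_if_eq_filter, List.nil_append]
        -- step 4: removal by membership in groupsToRemove is removal by the overlap test
        rw [show gs.filter (fun group =>
              !((gs.filter (fun group => group.any (fun node =>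
                  PySem.Set.contains (PySem.Set.update v m) node))).contains group)) =
            gs.filter (fun group => !(group.any (fun node =>
              PySem.Set.contains (PySem.Set.update v m) node))) by
          apply List.filter_congr
          intro g hg
          congr 1
          rw [Bool.eq_iff_iff]
          simp only [List.contains_iff_mem, List.mem_filter]
          tauto]
        -- step 5: invariants of the recursive call
        have hqm : m.any (fun node => PySem.Set.contains (PySem.Set.update v m) node) = true := by
          cases m with
          | nil => exact absurd hm_mem hne
          | cons n ns =>
            simp only [List.any_cons, Bool.or_eq_true]
            left
            simp only [PySem.Set.contains, List.contains_iff_mem]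
            rw [mem_update_iff]
            right; exact List.mem_cons_self ..
        have hlen' : (gs.filter (fun group => !(group.any (fun node =>
            PySem.Set.contains (PySem.Set.update v m) node)))).length < gs.length := by
          apply List.length_filter_lt_length_iff_exists.mpr
          refine ⟨m, hm_mem, ?_⟩
          show ¬((!(m.any (fun node => PySem.Set.contains (PySem.Set.update v m) node))) = true)
          rw [hqm]
          simp
        rw [ih _ (acc ++ [m]) (PySem.Set.update v m) (by omega)
          (fun hmem => hne (List.mem_filter.mp hmem).1)
          (fun g hg => by
            have := (List.mem_filter.mp hg).2
            simpa using this)]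
        -- step 7/8/9: the B side takes m and then greedily skips the overlapping groups
        rw [sorted_rev_filter, hs]
        have hdm : PySem.Set.isdisjoint v m = true := by
          rw [isdisjoint_eq, hdisj m hm_mem]
          rfl
        rw [List.filter_cons_of_neg
          (p := fun group => !(group.any (fun node =>
            PySem.Set.contains (PySem.Set.update v m) node))) (a := m) (l := t) (by
          intro hc
          have hc' : (!(m.any (fun node =>
            PySem.Set.contains (PySem.Set.update v m) node))) = true := hc
          rw [hqm] at hc'
          simp at hc')]
        rw [pyB_go_filter t.length t (PySem.Set.update v m) le_rfl]
        simp [pyB_go, hdm]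

-- ===== VERDICT (by name: the statement is the Claim_ definition above) =====
theorem getLargestNonoverlappingGroups_spec : Claim_equal_getLargestNonoverlappingGroups := by
  unfold Claim_equal_getLargestNonoverlappingGroups
  intro groups _ hpre
  unfold Spec_getLargestNonoverlappingGroups getLargestNonoverlappingGroups
    getLargestNonoverlappingGroups_alt
  rw [pyA_loop_eq (groups.length + 1) groups [] PySem.Set.empty (by omega) hpre
    (fun g _ => by simp [PySem.Set.contains, PySem.Set.empty])]
  rfl
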